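-- pv_equiv track=rewrite | github.com/Preethicoder/credit_card_check | credit_cardcheck.py | contain_consecutive
-- ===== SOURCE A (Python) =====
-- def contain_consecutive(text):
--     # Ensure that there are no 4 or more consecutive repeated digits
--     consecutive_count = 1
--     text = text.replace("-", "")
--     for index,char in enumerate(text):
--         if index > 0 and char == text[index-1]:
--             consecutive_count += 1
--             if consecutive_count >= 4:
--                 return False
--         else :
--             consecutive_count = 1
--     return True
-- ===== SOURCE B (Python) =====
-- def contain_consecutive(text):
--     # Build the run-length encoding of the text, then check no run reaches length 4.
--     text = text.replace("-", "")
--     runs = []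
--     for ch in text:
--         if runs and runs[-1][0] == ch:
--             runs[-1] = (ch, runs[-1][1] + 1)
--         else:
--             runs.append((ch, 1))
--     return all(n < 4 for _, n in runs)
-- ===== Notes on version B (the rewrite author's own statement) =====
-- stated objective: alternative
-- what changed: B builds the run-length encoding of the dash-stripped text and checks that every run is shorter than 4, instead of A's index-based running counter with an early return.
import Mathlib
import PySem

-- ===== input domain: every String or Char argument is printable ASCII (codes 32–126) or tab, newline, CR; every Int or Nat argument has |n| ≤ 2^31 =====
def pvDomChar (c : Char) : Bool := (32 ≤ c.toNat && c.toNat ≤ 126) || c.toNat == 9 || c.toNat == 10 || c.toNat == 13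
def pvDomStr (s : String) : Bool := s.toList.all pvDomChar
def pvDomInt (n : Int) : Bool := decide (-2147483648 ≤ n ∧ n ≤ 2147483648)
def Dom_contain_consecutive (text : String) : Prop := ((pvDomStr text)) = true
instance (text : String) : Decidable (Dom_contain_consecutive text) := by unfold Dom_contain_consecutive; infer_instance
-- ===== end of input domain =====

-- B replaces A's index-based running counter (with early exit) by building the
-- run-length encoding of the text and checking that every run is shorter than 4 (alternative decomposition).


-- ===== PORT A =====
-- the 'for index,char in enumerate(text)' loop with its early 'return False'
def pvLoopA (cs : List Char) : List (Int × Char) → Int → Bool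
  | [], _ => true
  | (i, c) :: rest, cnt =>
    if 0 < i ∧ PySem.List.pyGet? cs (i - 1) = some c then
      (if 4 ≤ cnt + 1 then false else pvLoopA cs rest (cnt + 1))
    else pvLoopA cs rest 1

def contain_consecutive (text : String) : Bool :=
  let t := PySem.Str.replace text "-" ""
  pvLoopA t.toList (PySem.List.enumerate t.toList 0) 1

-- ===== PORT B =====
-- one step of Source B's run-building loop; Python appends/updates at the END of `runs`,
-- the port keeps the run list REVERSED (head = most recent run) — the same runs, and
-- the final order-independent `all` is unaffected
def pvStepR (acc : List (Char × Int)) (ch : Char) : List (Char × Int) :=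
  match acc with
  | (d, n) :: tl => if d = ch then (d, n + 1) :: tl else (ch, 1) :: (d, n) :: tl
  | [] => [(ch, 1)]

def contain_consecutive_alt (text : String) : Bool :=
  let t := PySem.Str.replace text "-" ""
  (t.toList.foldl pvStepR []).all (fun p => decide (p.2 < 4))

-- ===== PRECONDITION & SPEC =====
def Spec_contain_consecutive (text : String) (out : Bool) : Prop := out = contain_consecutive_alt text
instance (text : String) (out : Bool) : Decidable (Spec_contain_consecutive text out) := by unfold Spec_contain_consecutive; infer_instance

-- ===== CLAIM (what is proved, stated in full; the proofs are below) =====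
def Claim_equal_contain_consecutive : Prop := ∀ (text : String), Dom_contain_consecutive text → Spec_contain_consecutive text (contain_consecutive text)

-- ===== LEMMAS AND PROOFS =====

-- proof-only bridge: A's loop with the previous character made explicit
def pvNoFour (prev : Char) (cnt : Int) : List Char → Bool
  | [] => true
  | c :: rest =>
    if c = prev then (if 4 ≤ cnt + 1 then false else pvNoFour c (cnt + 1) rest)
    else pvNoFour c 1 rest

theorem pvLoopA_eq_noFour (rest : List Char) : ∀ (pre : List Char) (prev : Char) (cnt : Int),
    pvLoopA (pre ++ prev :: rest) (PySem.List.enumerate rest ((pre.length : Int) + 1)) cnt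
      = pvNoFour prev cnt rest := by
  induction rest with
  | nil => intro pre prev cnt; simp [pvLoopA, pvNoFour]
  | cons c rest ih =>
    intro pre prev cnt
    rw [PySem.List.enumerate_cons]
    have hidx : (pre.length : Int) + 1 - 1 = (pre.length : Int) := by omega
    have hget : PySem.List.pyGet? (pre ++ prev :: c :: rest) ((pre.length : Int) + 1 - 1)
        = some prev := by rw [hidx]; exact PySem.List.pyGet?_append_length _ _ _
    have hre : pre ++ prev :: c :: rest = (pre ++ [prev]) ++ c :: rest := by simp
    have hlen : ((pre ++ [prev]).length : Int) + 1 = (pre.length : Int) + 1 + 1 := by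
      simp [List.length_append]
    have hpos : (0 : Int) < (pre.length : Int) + 1 := by omega
    by_cases h : c = prev
    · subst h
      simp only [pvLoopA, hget, pvNoFour]
      simp only [hpos, true_and, if_pos trivial]
      by_cases h4 : 4 ≤ cnt + 1
      · simp [h4]
      · rw [if_neg h4, if_neg h4]
        rw [hre, ← hlen]
        exact ih (pre ++ [c]) c (cnt + 1)
    · simp only [pvLoopA, hget, pvNoFour, if_neg h]
      have hcond : ¬ (0 < (pre.length : Int) + 1 ∧ some prev = some c) := by
        rintro ⟨-, h2⟩; exact h (by injection h2 with h2; exact h2.symm)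
      rw [if_neg hcond]
      have := ih (pre ++ [prev]) c 1
      rw [hre, ← hlen]
      exact this

theorem pvBad_persists (l : List Char) : ∀ acc : List (Char × Int),
    (∃ p ∈ acc, (4 : Int) ≤ p.2) → ∃ p ∈ l.foldl pvStepR acc, (4 : Int) ≤ p.2 := by
  induction l with
  | nil => intro acc h; simpa using h
  | cons c l ih =>
    intro acc h
    apply ih
    obtain ⟨p, hp, h4⟩ := h
    match acc, hp with
    | (d, n) :: tl, hp =>
      simp only [pvStepR]
      by_cases hdc : d = c
      · rw [if_pos hdc]
        rcases List.mem_cons.mp hp with h1 | h1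
        · exact ⟨(d, n + 1), List.mem_cons_self, by cases h1; simp at h4 ⊢; omega⟩
        · exact ⟨p, List.mem_cons_of_mem _ h1, h4⟩
      · rw [if_neg hdc]
        exact ⟨p, List.mem_cons_of_mem _ hp, h4⟩

theorem pvAllOk_false_of_bad (rs : List (Char × Int)) (h : ∃ p ∈ rs, (4 : Int) ≤ p.2) :
    rs.all (fun p => decide (p.2 < 4)) = false := by
  obtain ⟨p, hp, h4⟩ := h
  simp only [List.all_eq_false]
  exact ⟨p, hp, by simp; omega⟩

theorem pvFoldl_eq_noFour (l : List Char) : ∀ (d : Char) (n : Int) (tl : List (Char × Int)),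
    1 ≤ n → n ≤ 3 → tl.all (fun p => decide (p.2 < 4)) = true →
    (l.foldl pvStepR ((d, n) :: tl)).all (fun p => decide (p.2 < 4)) = pvNoFour d n l := by
  induction l with
  | nil =>
    intro d n tl h1 h3 htl
    simp [pvNoFour, htl]; omega
  | cons c l ih =>
    intro d n tl h1 h3 htl
    simp only [List.foldl_cons, pvStepR, pvNoFour]
    by_cases hdc : d = c
    · subst hdc
      rw [if_pos rfl, if_pos rfl]
      by_cases h4 : 4 ≤ n + 1
      · rw [if_pos h4]
        exact pvAllOk_false_of_bad _ (pvBad_persists l _ ⟨(d, n + 1), List.mem_cons_self, by simpa using h4⟩)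
      · rw [if_neg h4]
        exact ih d (n + 1) tl (by omega) (by omega) htl
    · rw [if_neg hdc, if_neg (fun h => hdc h.symm)]
      exact ih c 1 ((d, n) :: tl) (by omega) (by omega) (by simp [htl]; omega)

theorem pvMain (cs : List Char) :
    pvLoopA cs (PySem.List.enumerate cs 0) 1
      = (cs.foldl pvStepR []).all (fun p => decide (p.2 < 4)) := by
  cases cs with
  | nil => simp [pvLoopA]
  | cons c rest =>
    rw [PySem.List.enumerate_cons]
    have hstep : pvLoopA (c :: rest) ((0, c) :: PySem.List.enumerate rest (0 + 1)) 1
        = pvLoopA (c :: rest) (PySem.List.enumerate rest 1) 1 := by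
      norm_num [pvLoopA]
    rw [hstep]
    have hA := pvLoopA_eq_noFour rest [] c 1
    simp only [List.nil_append, List.length_nil, Int.natCast_zero, zero_add] at hA
    rw [hA]
    have hB := pvFoldl_eq_noFour rest c 1 [] (by omega) (by omega) (by simp)
    simp only [List.foldl_cons, pvStepR] at *
    rw [← hB]

-- ===== VERDICT (by name: the statement is the Claim_ definition above) =====
theorem contain_consecutive_spec : Claim_equal_contain_consecutive := by
  intro text _
  unfold Spec_contain_consecutive contain_consecutive contain_consecutive_alt
  exact pvMain _
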